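-- pv_equiv track=rewrite | github.com/bishtashish708/hikesim | backend/app/services/plan.py | _pick_training_days
-- ===== SOURCE A (Python) =====
-- from typing import Any, Dict, List, Literal, Optional, Tuple
--
-- def _pick_training_days(days_per_week: int, preferred_days: List[int], any_days: bool) -> List[int]:
--     ordered = [0, 2, 4, 5, 1, 3, 6]
--     safe_preferred = [day for day in preferred_days if 0 <= day <= 6]
--     selection: List[int] = []
--     if not any_days and safe_preferred:
--         for day in safe_preferred:
--             if day not in selection:
--                 selection.append(day)
--             if len(selection) >= days_per_week:
--                 break
--     for day in ordered:
--         if len(selection) >= days_per_week: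
--             break
--         if day not in selection:
--             selection.append(day)
--     return selection[:days_per_week]
-- ===== SOURCE B (Python) =====
-- def _pick_training_days(days_per_week, preferred_days, any_days):
--     ordered = [0, 2, 4, 5, 1, 3, 6]
--
--     def rank(day):
--         if not any_days and day in preferred_days:
--             return preferred_days.index(day)
--         return len(preferred_days) + ordered.index(day)
--
--     week = sorted(range(7), key=rank)
--     return week[:max(days_per_week, 0)]
-- ===== Notes on version B (the rewrite author's own statement) =====
-- stated objective: alternative
-- what changed: Replaces A's sequential scan-and-dedup over two break-guarded loops plus a final slice by computing a priority rank for each of the seven weekdays (its first position among the preferred days when those apply, otherwise after them in the canonical order) and sorting range(7) by that rank, then slicing the sorted week.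
import Mathlib
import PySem

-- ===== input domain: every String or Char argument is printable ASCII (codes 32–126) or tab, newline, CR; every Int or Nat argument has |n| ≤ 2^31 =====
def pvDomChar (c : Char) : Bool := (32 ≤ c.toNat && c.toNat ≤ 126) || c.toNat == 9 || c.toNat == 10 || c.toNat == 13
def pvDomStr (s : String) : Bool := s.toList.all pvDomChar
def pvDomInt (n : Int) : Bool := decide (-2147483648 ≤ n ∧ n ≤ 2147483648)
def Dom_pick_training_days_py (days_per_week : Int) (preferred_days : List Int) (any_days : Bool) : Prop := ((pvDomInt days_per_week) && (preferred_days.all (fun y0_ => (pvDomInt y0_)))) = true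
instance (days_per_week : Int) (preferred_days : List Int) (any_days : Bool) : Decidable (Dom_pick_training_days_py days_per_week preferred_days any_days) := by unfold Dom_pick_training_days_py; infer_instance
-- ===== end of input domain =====

-- B replaces A's break-guarded scan-and-dedup loops by computing a priority rank for each of
-- the seven weekdays and sorting range(7) by it, then slicing; objective: alternative algorithm.

-- ===== PORT A =====
-- first loop of A: append-if-absent, then break once len(selection) >= days_per_week
def pvA_loop1 (dpw : Int) : List Int → List Int → List Int
  | [], sel => sel
  | d :: ds, sel =>
    let sel' := if sel.contains d then sel else sel ++ [d]
    if dpw ≤ (sel'.length : Int) then sel' else pvA_loop1 dpw ds sel'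

-- second loop of A: break at top once len(selection) >= days_per_week, else append-if-absent
def pvA_loop2 (dpw : Int) : List Int → List Int → List Int
  | [], sel => sel
  | d :: ds, sel =>
    if dpw ≤ (sel.length : Int) then sel
    else pvA_loop2 dpw ds (if sel.contains d then sel else sel ++ [d])

def pick_training_days_py (days_per_week : Int) (preferred_days : List Int) (any_days : Bool) : List Int :=
  let ordered : List Int := [0, 2, 4, 5, 1, 3, 6]
  let safe_preferred := preferred_days.filter (fun day => decide (0 ≤ day) && decide (day ≤ 6))
  let selection : List Int := []
  let selection := if !any_days && !safe_preferred.isEmpty then pvA_loop1 days_per_week safe_preferred selection else selection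
  let selection := pvA_loop2 days_per_week ordered selection
  PySem.List.slice selection none (some days_per_week)

-- ===== PORT B =====
-- rank(day): first position among the preferred days when they apply, else after them in the
-- canonical order; list.index is guarded by the membership test, so index? is always some here
def pvB_rank (any_days : Bool) (preferred_days ordered : List Int) (day : Int) : Int :=
  if !any_days && preferred_days.contains day then
    (((PySem.List.index? preferred_days day).getD 0 : Nat) : Int)
  else
    (preferred_days.length : Int) + (((PySem.List.index? ordered day).getD 0 : Nat) : Int)

def pick_training_days_py_alt (days_per_week : Int) (preferred_days : List Int) (any_days : Bool) : List Int :=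
  let ordered : List Int := [0, 2, 4, 5, 1, 3, 6]
  let week := PySem.List.sorted (PySem.List.pyRange 0 7 1) (pvB_rank any_days preferred_days ordered) false
  PySem.List.slice week none (some (max days_per_week 0))

-- ===== PRECONDITION & SPEC =====
def Spec_pick_training_days_py (days_per_week : Int) (preferred_days : List Int) (any_days : Bool) (out : List Int) : Prop := out = pick_training_days_py_alt days_per_week preferred_days any_days
instance (days_per_week : Int) (preferred_days : List Int) (any_days : Bool) (out : List Int) : Decidable (Spec_pick_training_days_py days_per_week preferred_days any_days out) := by unfold Spec_pick_training_days_py; infer_instance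

-- ===== CLAIM (what is proved, stated in full; the proofs are below) =====
def Claim_equal_pick_training_days_py : Prop := ∀ (days_per_week : Int) (preferred_days : List Int) (any_days : Bool), Dom_pick_training_days_py days_per_week preferred_days any_days → Spec_pick_training_days_py days_per_week preferred_days any_days (pick_training_days_py days_per_week preferred_days any_days)

-- ===== LEMMAS AND PROOFS =====

-- proof-side normal form of A's two loops: one break-guarded first-N-distinct pass
def pvLoop (dpw : Int) : List Int → List Int → List Int
  | [], sel => sel
  | d :: ds, sel =>
    if dpw ≤ (sel.length : Int) then sel
    else pvLoop dpw ds (if sel.contains d then sel else sel ++ [d])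

-- proof-side unbounded dedup-keeping-first-occurrences fold
def pvDD : List Int → List Int → List Int
  | sel, [] => sel
  | sel, d :: ds => pvDD (if sel.contains d then sel else sel ++ [d]) ds

theorem pvLoop_absorb (dpw : Int) (l sel : List Int) (h : dpw ≤ (sel.length : Int)) :
    pvLoop dpw l sel = sel := by
  cases l with
  | nil => rfl
  | cons d ds => simp [pvLoop, h]

theorem pvLoop_append (dpw : Int) (xs ys sel : List Int) :
    pvLoop dpw (xs ++ ys) sel = pvLoop dpw ys (pvLoop dpw xs sel) := by
  induction xs generalizing sel with
  | nil => rfl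
  | cons x xs ih =>
    by_cases h : dpw ≤ (sel.length : Int)
    · simp [pvLoop, h, pvLoop_absorb dpw ys sel h]
    · simp [pvLoop, h, ih]

-- A's first loop agrees with pvLoop while the target is not yet reached
theorem pvA_loop1_eq (dpw : Int) (l : List Int) : ∀ sel : List Int, (sel.length : Int) < dpw →
    pvA_loop1 dpw l sel = pvLoop dpw l sel := by
  induction l with
  | nil => intro sel _; rfl
  | cons d ds ih =>
    intro sel h
    have hnot : ¬ dpw ≤ (sel.length : Int) := by omega
    have brk : ∀ sel' : List Int,
        (if dpw ≤ (sel'.length : Int) then sel' else pvA_loop1 dpw ds sel') = pvLoop dpw ds sel' := by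
      intro sel'
      by_cases hs : dpw ≤ (sel'.length : Int)
      · rw [if_pos hs, pvLoop_absorb dpw ds sel' hs]
      · rw [if_neg hs]; exact ih sel' (lt_of_not_ge hs)
    simp only [pvA_loop1, pvLoop, if_neg hnot]
    exact brk _

-- A's second loop is literally pvLoop
theorem pvA_loop2_eq (dpw : Int) (l : List Int) : ∀ sel : List Int,
    pvA_loop2 dpw l sel = pvLoop dpw l sel := by
  induction l with
  | nil => intro sel; rfl
  | cons d ds ih => intro sel; simp [pvA_loop2, pvLoop, ih]

-- pvDD only appends to its accumulator
theorem pvDD_suffix (l : List Int) : ∀ sel : List Int, ∃ t, pvDD sel l = sel ++ t := by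
  induction l with
  | nil => intro sel; exact ⟨[], by simp [pvDD]⟩
  | cons d ds ih =>
    intro sel
    by_cases h : d ∈ sel
    · obtain ⟨t, ht⟩ := ih sel; exact ⟨t, by simpa [pvDD, h] using ht⟩
    · obtain ⟨t, ht⟩ := ih (sel ++ [d])
      exact ⟨d :: t, by simp [pvDD, h]; simpa using ht⟩

-- the break-guarded pass is the truncation of the unbounded dedup pass
theorem pvLoop_eq_take (dpw : Int) (hdpw : 0 ≤ dpw) (l : List Int) :
    ∀ sel : List Int, sel.length ≤ dpw.toNat →
    pvLoop dpw l sel = (pvDD sel l).take dpw.toNat := by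
  induction l with
  | nil =>
    intro sel h
    simp [pvLoop, pvDD, List.take_of_length_le h]
  | cons d ds ih =>
    intro sel h
    by_cases hs : dpw ≤ (sel.length : Int)
    · have hlen : sel.length = dpw.toNat := by omega
      obtain ⟨t, ht⟩ := pvDD_suffix ds (if sel.contains d then sel else sel ++ [d])
      have hpre : ∃ u, pvDD sel (d :: ds) = sel ++ u := by
        by_cases hc : d ∈ sel
        · exact ⟨t, by simp only [pvDD, hc, if_pos, List.contains_iff_mem] at ht ⊢; exact ht⟩
        · refine ⟨d :: t, ?_⟩
          simp only [pvDD, hc, List.contains_iff_mem, if_neg, if_false] at ht ⊢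
          simp at ht ⊢
          simpa using ht
      obtain ⟨u, hu⟩ := hpre
      rw [pvLoop, if_pos hs, hu, ← hlen, List.take_left]
    · have hlt : sel.length < dpw.toNat := by omega
      rw [pvLoop, if_neg hs]
      by_cases hc : d ∈ sel
      · simp only [pvDD, List.contains_iff_mem, hc, if_true, if_pos]
        exact ih sel h
      · simp only [pvDD, List.contains_iff_mem, hc, if_false, if_neg]
        exact ih (sel ++ [d]) (by simp; omega)

theorem pvDD_nodup (l : List Int) : ∀ sel : List Int, sel.Nodup → (pvDD sel l).Nodup := by
  induction l with
  | nil => intro sel h; simpa [pvDD] using h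
  | cons d ds ih =>
    intro sel h
    by_cases hc : d ∈ sel
    · simpa [pvDD, hc] using ih sel h
    · simp only [pvDD, List.contains_iff_mem, hc, if_false, if_neg]
      refine ih (sel ++ [d]) ?_
      simp only [List.nodup_append, h, List.nodup_singleton, true_and]
      intro a ha b hb
      rw [List.mem_singleton] at hb
      subst hb
      exact fun he => hc (he ▸ ha)

theorem pvDD_mem (l : List Int) : ∀ sel (x : Int), x ∈ pvDD sel l ↔ x ∈ sel ∨ x ∈ l := by
  induction l with
  | nil => intro sel x; simp [pvDD]
  | cons d ds ih =>
    intro sel x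
    by_cases hc : d ∈ sel
    · simp only [pvDD, List.contains_iff_mem, hc, if_true, if_pos, ih, List.mem_cons]
      constructor
      · rintro (h | h) <;> tauto
      · rintro (h | rfl | h) <;> tauto
    · simp only [pvDD, List.contains_iff_mem, hc, if_false, ih, List.mem_append,
        List.mem_singleton, List.mem_cons]
      tauto

-- the dedup pass lists its elements in order of first occurrence in the scanned list
theorem pvDD_pairwise_idxOf_aux (pool : List Int) : ∀ (l pre sel : List Int),
    pool = pre ++ l →
    (∀ x, x ∈ sel ↔ x ∈ pre) →
    sel.Pairwise (fun a b => pool.idxOf a < pool.idxOf b) →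
    (∀ a ∈ sel, pool.idxOf a < pre.length) →
    (pvDD sel l).Pairwise (fun a b => pool.idxOf a < pool.idxOf b) := by
  intro l
  induction l with
  | nil => intro pre sel _ _ hpw _; simpa [pvDD] using hpw
  | cons d ds ih =>
    intro pre sel hpool hmem hpw hbd
    by_cases hc : d ∈ sel
    · have hd : d ∈ pre := (hmem d).mp hc
      simp only [pvDD, List.contains_iff_mem, hc, if_true, if_pos]
      refine ih (pre ++ [d]) sel (by simp [hpool]) ?_ hpw ?_
      · intro x; rw [hmem]
        simp only [List.mem_append, List.mem_singleton]
        constructor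
        · tauto
        · rintro (h | rfl) <;> [exact h; exact hd]
      · intro a ha; have := hbd a ha; simp; omega
    · have hdpre : d ∉ pre := fun h => hc ((hmem d).mpr h)
      have hidxd : pool.idxOf d = pre.length := by
        rw [hpool, List.idxOf_append_of_notMem hdpre]
        simp
      simp only [pvDD, List.contains_iff_mem, hc, if_false, if_neg]
      refine ih (pre ++ [d]) (sel ++ [d]) (by simp [hpool]) ?_ ?_ ?_
      · intro x
        simp only [List.mem_append, List.mem_singleton, hmem]
      · rw [List.pairwise_append]
        refine ⟨hpw, by simp, ?_⟩
        intro a ha b hb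
        rw [List.mem_singleton] at hb; subst hb
        rw [hidxd]; exact hbd a ha
      · intro a ha
        rcases List.mem_append.mp ha with h | h
        · have := hbd a h; simp; omega
        · rw [List.mem_singleton] at h; subst h
          simp [hidxd]

theorem pvDD_pairwise_idxOf (pool : List Int) :
    (pvDD [] pool).Pairwise (fun a b => pool.idxOf a < pool.idxOf b) :=
  pvDD_pairwise_idxOf_aux pool pool [] [] rfl (by simp) (by simp) (by simp)

-- filtering preserves the relative order of first occurrences
theorem filter_idxOf_mono (p : Int → Bool) : ∀ (l : List Int) (a b : Int),
    a ∈ l.filter p → b ∈ l.filter p →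
    (l.filter p).idxOf a < (l.filter p).idxOf b → l.idxOf a < l.idxOf b := by
  intro l
  induction l with
  | nil => intro a b ha _ _; simp at ha
  | cons x t ih =>
    intro a b ha hb hlt
    by_cases hp : p x
    · rw [List.filter_cons_of_pos hp] at ha hb hlt
      by_cases hax : x = a
      · subst hax
        by_cases hbx : x = b
        · subst hbx; omega
        · have hb' : (x == b) = false := by simp [hbx]
          simp only [List.idxOf_cons, beq_self_eq_true, cond_true, hb', cond_false]
          omega
      · have ha' : (x == a) = false := by simp [hax]
        by_cases hbx : x = b
        · subst hbx
          simp only [List.idxOf_cons, beq_self_eq_true, cond_true, ha', cond_false] at hlt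
          omega
        · have hb' : (x == b) = false := by simp [hbx]
          simp only [List.idxOf_cons, ha', hb', cond_false] at hlt ⊢
          have ha2 : a ∈ t.filter p := by
            rcases List.mem_cons.mp ha with h | h
            · exact absurd h.symm hax
            · exact h
          have hb2 : b ∈ t.filter p := by
            rcases List.mem_cons.mp hb with h | h
            · exact absurd h.symm hbx
            · exact h
          have := ih a b ha2 hb2 (by omega)
          omega
    · rw [List.filter_cons_of_neg hp] at ha hb hlt
      have hax : x ≠ a := fun h => hp (h ▸ (List.mem_filter.mp ha).2)
      have hbx : x ≠ b := fun h => hp (h ▸ (List.mem_filter.mp hb).2)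
      have ha' : (x == a) = false := by simp [hax]
      have hb' : (x == b) = false := by simp [hbx]
      simp only [List.idxOf_cons, ha', hb', cond_false]
      have := ih a b ha hb hlt
      omega

-- list.index under its membership guard is idxOf
theorem index?_getD_eq_idxOf (l : List Int) (x : Int) (h : x ∈ l) :
    (PySem.List.index? l x).getD 0 = l.idxOf x := by
  have hsome : List.idxOf? x l = some (l.idxOf x) := by
    induction l with
    | nil => simp at h
    | cons a t ih =>
      by_cases hx : a = x
      · simp [List.idxOf?_cons, hx]
      · rcases List.mem_cons.mp h with h1 | h1
        · exact absurd h1.symm hx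
        · simp [List.idxOf?_cons, hx, ih h1]
  rw [PySem.List.index?_eq_idxOf?, hsome]; rfl

theorem mem_pvOrdered_iff (a : Int) : a ∈ ([0, 2, 4, 5, 1, 3, 6] : List Int) ↔ 0 ≤ a ∧ a ≤ 6 := by
  simp [List.mem_cons]; omega

-- the rank computed by B is strictly monotone in the position of a day's first occurrence in
-- A's priority sequence (filtered preferred days, then the canonical order)
theorem rank_mono (pref : List Int) (anyd : Bool) (a b : Int)
    (hpool : a ∈ (if anyd then ([] : List Int) else pref.filter (fun day => decide (0 ≤ day) && decide (day ≤ 6))) ++ ([0, 2, 4, 5, 1, 3, 6] : List Int) ∧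
             b ∈ (if anyd then ([] : List Int) else pref.filter (fun day => decide (0 ≤ day) && decide (day ≤ 6))) ++ ([0, 2, 4, 5, 1, 3, 6] : List Int))
    (hlt : ((if anyd then ([] : List Int) else pref.filter (fun day => decide (0 ≤ day) && decide (day ≤ 6))) ++ ([0, 2, 4, 5, 1, 3, 6] : List Int)).idxOf a <
           ((if anyd then ([] : List Int) else pref.filter (fun day => decide (0 ≤ day) && decide (day ≤ 6))) ++ ([0, 2, 4, 5, 1, 3, 6] : List Int)).idxOf b) :
    pvB_rank anyd pref ([0, 2, 4, 5, 1, 3, 6] : List Int) a < pvB_rank anyd pref ([0, 2, 4, 5, 1, 3, 6] : List Int) b := by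
  obtain ⟨ha, hb⟩ := hpool
  set p : Int → Bool := fun day => decide (0 ≤ day) && decide (day ≤ 6) with hp
  set ordered : List Int := [0, 2, 4, 5, 1, 3, 6] with hord
  cases anyd with
  | true =>
    simp only [if_true, List.nil_append] at ha hb hlt
    have hia := index?_getD_eq_idxOf ordered a ha
    have hib := index?_getD_eq_idxOf ordered b hb
    simp only [pvB_rank, Bool.not_true, Bool.false_and, if_neg Bool.false_ne_true, hia, hib]
    omega
  | false =>
    simp only [if_neg Bool.false_ne_true] at ha hb hlt
    set front := pref.filter p with hfront
    -- every member of the pool lies in 0..6, hence in ordered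
    have hbound : ∀ x : Int, x ∈ front ++ ordered → 0 ≤ x ∧ x ≤ 6 := by
      intro x hx
      rcases List.mem_append.mp hx with h | h
      · have := (List.mem_filter.mp h).2
        rw [hp] at this; simp at this; exact this
      · exact (mem_pvOrdered_iff x).mp h
    have hmemord : ∀ x : Int, x ∈ front ++ ordered → x ∈ ordered :=
      fun x hx => (mem_pvOrdered_iff x).mpr (hbound x hx)
    -- for pool members, membership in front is membership in pref
    have hfrontmem : ∀ x : Int, x ∈ front ++ ordered → (x ∈ front ↔ x ∈ pref) := by
      intro x hx
      rw [hfront, List.mem_filter]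
      constructor
      · exact fun h => h.1
      · intro h
        refine ⟨h, ?_⟩
        rw [hp]; have := hbound x hx; simp; omega
    have hrank : ∀ x : Int, x ∈ front ++ ordered →
        pvB_rank false pref ordered x =
          if x ∈ pref then (pref.idxOf x : Int)
          else (pref.length : Int) + (ordered.idxOf x : Int) := by
      intro x hx
      by_cases hm : x ∈ pref
      · simp only [pvB_rank, Bool.not_false, Bool.true_and,
          if_pos ((List.contains_iff_mem).mpr hm), if_pos hm]
        rw [index?_getD_eq_idxOf pref x hm]
      · simp only [pvB_rank, Bool.not_false, Bool.true_and, if_neg hm,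
          if_neg (fun h => hm ((List.contains_iff_mem).mp h))]
        rw [index?_getD_eq_idxOf ordered x (hmemord x hx)]
    -- the pool position of a member
    have hidx : ∀ x : Int, x ∈ front ++ ordered →
        (front ++ ordered).idxOf x =
          if x ∈ front then front.idxOf x else front.length + ordered.idxOf x := by
      intro x hx
      by_cases hm : x ∈ front
      · rw [if_pos hm, List.idxOf_append_of_mem hm]
      · rw [if_neg hm, List.idxOf_append_of_notMem hm]
    rw [hrank a ha, hrank b hb]
    rw [hidx a ha, hidx b hb] at hlt
    by_cases hma : a ∈ front
    · have hma' : a ∈ pref := (hfrontmem a ha).mp hma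
      by_cases hmb : b ∈ front
      · have hmb' : b ∈ pref := (hfrontmem b hb).mp hmb
        rw [if_pos hma', if_pos hmb']
        rw [if_pos hma, if_pos hmb] at hlt
        have := filter_idxOf_mono p pref a b (hfront ▸ hma) (hfront ▸ hmb) hlt
        omega
      · have hmb' : b ∉ pref := fun h => hmb ((hfrontmem b hb).mpr h)
        rw [if_pos hma', if_neg hmb']
        have := List.idxOf_lt_length_of_mem hma'
        omega
    · have hma' : a ∉ pref := fun h => hma ((hfrontmem a ha).mpr h)
      by_cases hmb : b ∈ front
      · rw [if_neg hma, if_pos hmb] at hlt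
        have := List.idxOf_lt_length_of_mem hmb
        omega
      · have hmb' : b ∉ pref := fun h => hmb ((hfrontmem b hb).mpr h)
        rw [if_neg hma', if_neg hmb']
        rw [if_neg hma, if_neg hmb] at hlt
        omega

-- the dedup of A's priority sequence is a rearrangement of range(7)
theorem pvDD_perm (pref : List Int) (anyd : Bool) :
    (pvDD [] ((if anyd then ([] : List Int) else pref.filter (fun day => decide (0 ≤ day) && decide (day ≤ 6))) ++ ([0, 2, 4, 5, 1, 3, 6] : List Int))).Perm (PySem.List.pyRange 0 7 1) := by
  set front := (if anyd then ([] : List Int) else pref.filter (fun day => decide (0 ≤ day) && decide (day ≤ 6))) with hfront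
  refine (List.perm_ext_iff_of_nodup (pvDD_nodup _ [] (by simp)) (PySem.List.nodup_pyRange_one 0 7)).mpr ?_
  intro x
  rw [pvDD_mem, PySem.List.mem_pyRange_one]
  simp only [List.mem_append, List.not_mem_nil, false_or]
  constructor
  · rintro (h | h)
    · rw [hfront] at h
      split at h
      · simp at h
      · have := (List.mem_filter.mp h).2
        simp at this; omega
    · have := (mem_pvOrdered_iff x).mp h; omega
  · intro h
    exact Or.inr ((mem_pvOrdered_iff x).mpr (by omega))

theorem slice_to_of_le (xs : List Int) (b : Int) (h : (xs.length : Int) ≤ b) :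
    PySem.List.slice xs none (some b) = xs := by
  rw [PySem.List.slice_to xs (by omega)]
  exact List.take_of_length_le (by omega)

-- the slice xs[:b] is empty when b ≤ 0 and the list has at most one element
theorem slice_to_nonpos (xs : List Int) (b : Int) (hb : b ≤ 0) (hlen : xs.length ≤ 1) :
    PySem.List.slice xs none (some b) = [] := by
  rcases eq_or_lt_of_le hb with h0 | hneg
  · rw [h0, PySem.List.slice_to xs le_rfl]
    simp
  · have hk : b = -(((-b).toNat : Nat) : Int) := by omega
    rw [hk, PySem.List.slice_to_neg_natCast xs _ (by omega)]
    have h0 : xs.length - (-b).toNat = 0 := by omega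
    rw [h0]
    rfl

-- ===== VERDICT (by name: the statement is the Claim_ definition above) =====
theorem pick_training_days_py_spec : Claim_equal_pick_training_days_py := by
  intro dpw pref anyd _
  unfold Spec_pick_training_days_py pick_training_days_py pick_training_days_py_alt
  simp only []
  set ordered : List Int := [0, 2, 4, 5, 1, 3, 6] with hord
  set safe := pref.filter (fun day => decide (0 ≤ day) && decide (day ≤ 6)) with hsafe
  set front := (if anyd then ([] : List Int) else safe) with hfront
  -- B's sorted week is the dedup of A's priority sequence
  have hweek : PySem.List.sorted (PySem.List.pyRange 0 7 1) (pvB_rank anyd pref ordered) false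
      = pvDD [] (front ++ ordered) := by
    refine PySem.List.sorted_eq_of_perm_of_pairwise_lt _ _ _ (pvDD_perm pref anyd) ?_
    refine (pvDD_pairwise_idxOf (front ++ ordered)).imp_of_mem ?_
    intro a b haa hbb hlt
    exact rank_mono pref anyd a b
      ⟨(pvDD_mem _ [] a).mp haa |>.resolve_left (by simp),
       (pvDD_mem _ [] b).mp hbb |>.resolve_left (by simp)⟩ hlt
  rw [hweek]
  by_cases hd : dpw ≤ 0
  · -- both sides are []
    have hmax : max dpw 0 = 0 := by omega
    rw [hmax, PySem.List.slice_to _ le_rfl]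
    simp only [Int.toNat_zero, List.take_zero]
    by_cases hcond : (!anyd && !safe.isEmpty) = true
    · -- A's first loop appends one day and breaks; the final slice drops it
      have hne : safe ≠ [] := by
        intro hnil; rw [hnil] at hcond; simp at hcond
      obtain ⟨d, ds, hds⟩ := List.exists_cons_of_ne_nil hne
      have h1 : pvA_loop1 dpw safe [] = [d] := by
        rw [hds]; simp [pvA_loop1, show dpw ≤ (1 : Int) from by omega]
      have h2 : pvA_loop2 dpw ordered [d] = [d] := by
        rw [pvA_loop2_eq]; exact pvLoop_absorb dpw _ [d] (by simp; omega)
      rw [if_pos hcond, h1, h2]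
      exact slice_to_nonpos [d] dpw hd (by simp)
    · rw [if_neg hcond]
      have h2 : pvA_loop2 dpw ordered [] = [] := by
        rw [pvA_loop2_eq]; exact pvLoop_absorb dpw _ [] (by simpa using hd)
      rw [h2]
      exact slice_to_nonpos [] dpw hd (by simp)
  · -- 0 < dpw : A is the first-dpw prefix of the dedup of the priority sequence, as is B
    have hpos : (0 : Int) < dpw := by omega
    have hstart : (if (!anyd && !safe.isEmpty) = true then pvA_loop1 dpw safe [] else []) =
        pvLoop dpw front [] := by
      by_cases hc : (!anyd && !safe.isEmpty) = true
      · have ha : anyd = false := by cases anyd <;> simp_all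
        rw [if_pos hc, hfront, ha, if_neg Bool.false_ne_true]
        exact pvA_loop1_eq dpw safe [] (by simpa using hpos)
      · rw [if_neg hc]
        cases ha : anyd with
        | true => rw [hfront, ha, if_pos rfl]; rfl
        | false =>
          have hemp : safe = [] := by
            cases hs : safe.isEmpty
            · exact absurd (by simp [ha, hs]) hc
            · simpa [List.isEmpty_iff] using hs
          rw [hfront, ha, if_neg Bool.false_ne_true, hemp]; rfl
    rw [hstart, pvA_loop2_eq, ← pvLoop_append,
      pvLoop_eq_take dpw (by omega) (front ++ ordered) [] (by simp)]
    have hmax : max dpw 0 = dpw := by omega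
    have hlen : (((pvDD [] (front ++ ordered)).take dpw.toNat).length : Int) ≤ dpw := by
      have := List.length_take_le dpw.toNat (pvDD [] (front ++ ordered))
      omega
    rw [hmax, slice_to_of_le ((pvDD [] (front ++ ordered)).take dpw.toNat) dpw hlen,
      PySem.List.slice_to (pvDD [] (front ++ ordered)) (le_of_lt hpos)]
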